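-- pv_equiv track=rewrite | github.com/anujsoni3/Economic-Times_Nityam | backend/my_et_agent.py | _fallback_filter
-- ===== SOURCE A (Python) =====
-- from typing import List, Dict, Any, TypedDict
--
-- def _tokenize_interests(interests: str) -> List[str]:
--     parts = [p.strip().lower() for p in interests.replace("/", ",").split(",")]
--     tokens: List[str] = []
--     for part in parts:
--         for word in part.split():
--             clean = "".join(ch for ch in word if ch.isalnum() or ch in {"-", "+"})
--             if len(clean) >= 3:
--                 tokens.append(clean)
--     return list(dict.fromkeys(tokens))
--
-- def _fallback_filter(raw_articles: List[Dict[str, Any]], interests: str) -> List[Dict[str, Any]]: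
--     tokens = _tokenize_interests(interests)
--     if not tokens:
--         return raw_articles[:12]
--
--     ranked: List[tuple[int, Dict[str, Any], str]] = []
--     for article in raw_articles:
--         title = (article.get("title") or "").lower()
--         summary = (article.get("summary") or "").lower()
--         haystack = f"{title} {summary}"
--
--         matches = [token for token in tokens if token in haystack]
--         if not matches:
--             continue
--
--         reason_tokens = ", ".join(matches[:3])
--         reason = f"This story is relevant to your interests around {reason_tokens}."
--         score = len(matches)
--
--         enriched = dict(article)
--         enriched["match_reason"] = reason
--         ranked.append((score, enriched, reason))
--
--     ranked.sort(key=lambda item: item[0], reverse=True)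
--     return [item[1] for item in ranked[:12]]
-- ===== SOURCE B (Python) =====
-- from typing import List, Dict, Any
--
--
-- def _tokenize_interests(interests: str) -> List[str]:
--     parts = [p.strip().lower() for p in interests.replace("/", ",").split(",")]
--     tokens: List[str] = []
--     for part in parts:
--         for word in part.split():
--             clean = "".join(ch for ch in word if ch.isalnum() or ch in {"-", "+"})
--             if len(clean) >= 3:
--                 tokens.append(clean)
--     return list(dict.fromkeys(tokens))
--
--
-- def _fallback_filter(raw_articles: List[Dict[str, Any]], interests: str) -> List[Dict[str, Any]]:
--     tokens = _tokenize_interests(interests)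
--     if not tokens:
--         return raw_articles[:12]
--
--     # one pass: score each article and drop non-matching ones
--     scored: List[tuple[int, Dict[str, Any]]] = []
--     for article in raw_articles:
--         haystack = (article.get("title") or "").lower() + " " + (article.get("summary") or "").lower()
--         matches = [token for token in tokens if token in haystack]
--         if matches:
--             enriched = dict(article)
--             enriched["match_reason"] = (
--                 "This story is relevant to your interests around "
--                 + ", ".join(matches[:3]) + "."
--             )
--             scored.append((len(matches), enriched))
--
--     # counting sort: group by score, then emit buckets from highest score down
--     buckets: Dict[int, List[Dict[str, Any]]] = {}
--     for score, enriched in scored: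
--         buckets.setdefault(score, []).append(enriched)
--
--     out: List[Dict[str, Any]] = []
--     for s in range(len(tokens), 0, -1):
--         out.extend(buckets.get(s, []))
--     return out[:12]
-- ===== Notes on version B (the rewrite author's own statement) =====
-- stated objective: alternative
-- what changed: B replaces A's comparison sort of the scored articles (stable sort by score, reverse=True) by a counting/bucket sort: it groups enriched articles into a dict keyed by match count in one pass and emits the buckets from the highest possible score down, which preserves A's exact order including ties.
import Mathlib
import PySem

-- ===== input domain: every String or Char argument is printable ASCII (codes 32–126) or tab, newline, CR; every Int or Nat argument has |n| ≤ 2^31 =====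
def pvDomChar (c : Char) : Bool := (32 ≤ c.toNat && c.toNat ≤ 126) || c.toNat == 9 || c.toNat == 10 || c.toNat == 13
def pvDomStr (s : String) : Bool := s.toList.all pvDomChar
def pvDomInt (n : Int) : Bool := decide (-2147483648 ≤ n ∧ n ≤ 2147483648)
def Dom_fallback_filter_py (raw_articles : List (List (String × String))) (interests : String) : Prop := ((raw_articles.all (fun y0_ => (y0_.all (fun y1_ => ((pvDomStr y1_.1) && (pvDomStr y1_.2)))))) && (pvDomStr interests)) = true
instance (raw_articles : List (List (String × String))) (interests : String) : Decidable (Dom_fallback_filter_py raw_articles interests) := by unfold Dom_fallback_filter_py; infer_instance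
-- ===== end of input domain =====

-- B replaces A's comparison sort of the scored articles by a counting/bucket sort keyed on the
-- match count (group once, emit buckets from the highest score down); objective: alternative.
-- Note: equivalence is about the RETURN value; neither program mutates its arguments.

-- ===== PORT A =====
-- shared same-module helper `_tokenize_interests` (used verbatim by both A and B)
def tokenize_interests (interests : String) : List String :=
  let parts := (PySem.Chars.splitOn (PySem.Str.replace interests "/" ",").toList [',']).map
      (fun p => PySem.Chars.lower (PySem.Chars.strip p))
  let tokens := parts.foldl (fun tokens part =>
    (PySem.Chars.split₀ part).foldl (fun tokens word =>
      let clean := word.filter (fun ch => PySem.Chars.isalnum ch || ch == '-' || ch == '+')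
      if 3 ≤ clean.length then tokens ++ [String.ofList clean] else tokens) tokens) []
  PySem.List.dedup tokens

-- `article.get(k) or ""` (values are strings, so the `or` only replaces a missing key by "")
def pyGetStr (article : List (String × String)) (k : String) : String :=
  ((PySem.Dict.mk article).get? k).getD ""

def fallback_filter_py (raw_articles : List (List (String × String))) (interests : String) : List (List (String × String)) :=
  let tokens := tokenize_interests interests
  if tokens = [] then
    PySem.List.slice raw_articles none (some 12)
  else
    let ranked : List (Int × List (String × String) × String) :=
      raw_articles.foldl (fun ranked article =>
        let title := PySem.Str.lower (pyGetStr article "title")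
        let summary := PySem.Str.lower (pyGetStr article "summary")
        let haystack := title ++ " " ++ summary
        let ms := tokens.filter (fun token => PySem.Str.isIn token haystack)
        if ms = [] then ranked
        else
          let reason := "This story is relevant to your interests around " ++
            PySem.Str.join ", " (PySem.List.slice ms none (some 3)) ++ "."
          let score : Int := (ms.length : Int)
          let enriched := ((PySem.Dict.ofList article).insert "match_reason" reason).items
          ranked ++ [(score, enriched, reason)]) []
    let ranked2 := PySem.List.sorted ranked (fun item => item.1) true
    (PySem.List.slice ranked2 none (some 12)).map (fun item => item.2.1)

-- ===== PORT B =====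
def fallback_filter_py_alt (raw_articles : List (List (String × String))) (interests : String) : List (List (String × String)) :=
  let tokens := tokenize_interests interests
  if tokens = [] then
    PySem.List.slice raw_articles none (some 12)
  else
    -- one pass: score each article and drop non-matching ones
    let scored : List (Int × List (String × String)) :=
      raw_articles.foldl (fun scored article =>
        let haystack := PySem.Str.lower (pyGetStr article "title") ++ " " ++
          PySem.Str.lower (pyGetStr article "summary")
        let ms := tokens.filter (fun token => PySem.Str.isIn token haystack)
        if ms = [] then scored
        else
          let enriched := ((PySem.Dict.ofList article).insert "match_reason"
            ("This story is relevant to your interests around " ++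
              PySem.Str.join ", " (PySem.List.slice ms none (some 3)) ++ ".")).items
          scored ++ [((ms.length : Int), enriched)]) []
    -- counting sort: group by score, then emit buckets from highest score down
    let buckets : PySem.Dict Int (List (List (String × String))) :=
      scored.foldl (fun buckets p => buckets.insert p.1 (buckets.getD p.1 [] ++ [p.2]))
        (PySem.Dict.mk [])
    let out := (PySem.List.pyRange (tokens.length : Int) 0 (-1)).foldl
      (fun out s => out ++ buckets.getD s []) []
    PySem.List.slice out none (some 12)

-- ===== PRECONDITION & SPEC =====
def Spec_fallback_filter_py (raw_articles : List (List (String × String))) (interests : String) (out : List (List (String × String))) : Prop := out = fallback_filter_py_alt raw_articles interests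
instance (raw_articles : List (List (String × String))) (interests : String) (out : List (List (String × String))) : Decidable (Spec_fallback_filter_py raw_articles interests out) := by unfold Spec_fallback_filter_py; infer_instance

-- ===== CLAIM (what is proved, stated in full; the proofs are below) =====
def Claim_equal_fallback_filter_py : Prop := ∀ (raw_articles : List (List (String × String))) (interests : String), Dom_fallback_filter_py raw_articles interests → Spec_fallback_filter_py raw_articles interests (fallback_filter_py raw_articles interests)

-- ===== LEMMAS AND PROOFS =====

-- inserting x after a block of not-before elements and in front of a block of before elements
theorem insertBy_middle {α : Type} (before : α → α → Bool) (x : α) :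
    ∀ (l₁ l₂ : List α), (∀ y ∈ l₁, before x y = false) → (∀ y ∈ l₂, before x y = true) →
      PySem.List.insertBy before x (l₁ ++ l₂) = l₁ ++ x :: l₂ := by
  intro l₁
  induction l₁ with
  | nil =>
    intro l₂ _ h₂
    cases l₂ with
    | nil => simp [PySem.List.insertBy]
    | cons h t => simp [PySem.List.insertBy, h₂ h (by simp)]
  | cons a l₁ ih =>
    intro l₂ h₁ h₂
    simp only [List.cons_append, PySem.List.insertBy, h₁ a (by simp), Bool.false_eq_true,
      if_false]
    rw [ih l₂ (fun y hy => h₁ y (by simp [hy])) h₂]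

-- splitting a countdown range
theorem pyRange_neg_one_split (a m b : Int) (h1 : b ≤ m) (h2 : m ≤ a) :
    PySem.List.pyRange a b (-1) = PySem.List.pyRange a m (-1) ++ PySem.List.pyRange m b (-1) := by
  rw [PySem.List.pyRange_neg_one_eq_reverse a b, PySem.List.pyRange_neg_one_eq_reverse a m,
    PySem.List.pyRange_neg_one_eq_reverse m b, ← List.reverse_append,
    ← PySem.List.pyRange_one_append (b + 1) (m + 1) (a + 1) (by omega) (by omega)]

theorem pyRange_neg_one_singleton (k : Int) :
    PySem.List.pyRange k (k - 1) (-1) = [k] := by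
  rw [PySem.List.pyRange_neg_one_cons (by omega),
    PySem.List.pyRange_neg_one_eq_nil (by omega)]

-- Python's stable reverse sort on integer keys in [1, T] is the concatenation of the
-- score buckets, highest score first
theorem sorted_rev_eq_buckets {α : Type} (key : α → Int) (T : Int) :
    ∀ (xs : List α), (∀ x ∈ xs, 1 ≤ key x ∧ key x ≤ T) →
      PySem.List.sorted xs key true
        = (PySem.List.pyRange T 0 (-1)).flatMap
            (fun s => xs.filter (fun x => decide (key x = s))) := by
  intro xs
  induction xs using List.reverseRecOn with
  | nil => simp [PySem.List.sorted_rev_eq_foldl_insertBy]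
  | append_singleton ys x ih =>
    intro hb
    have hkx : 1 ≤ key x ∧ key x ≤ T := hb x (by simp)
    have hys : ∀ y ∈ ys, 1 ≤ key y ∧ key y ≤ T := fun y hy => hb y (by simp [hy])
    rw [PySem.List.sorted_rev_eq_foldl_insertBy, List.foldl_append, List.foldl_cons,
      List.foldl_nil, ← PySem.List.sorted_rev_eq_foldl_insertBy, ih hys]
    have hsplit : PySem.List.pyRange T 0 (-1)
        = (PySem.List.pyRange T (key x) (-1) ++ [key x]) ++ PySem.List.pyRange (key x - 1) 0 (-1) := by
      rw [pyRange_neg_one_split T (key x - 1) 0 (by omega) (by omega),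
        pyRange_neg_one_split T (key x) (key x - 1) (by omega) (by omega),
        pyRange_neg_one_singleton]
    rw [hsplit]
    simp only [List.flatMap_append, List.flatMap_cons, List.flatMap_nil, List.append_nil]
    rw [insertBy_middle _ x
      ((PySem.List.pyRange T (key x) (-1)).flatMap (fun s => ys.filter (fun y => decide (key y = s)))
        ++ ys.filter (fun y => decide (key y = key x)))
      ((PySem.List.pyRange (key x - 1) 0 (-1)).flatMap (fun s => ys.filter (fun y => decide (key y = s))))
      ?_ ?_]
    · have hA : ∀ s ∈ PySem.List.pyRange T (key x) (-1),
          (ys ++ [x]).filter (fun y => decide (key y = s)) = ys.filter (fun y => decide (key y = s)) := by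
        intro s hs
        rw [PySem.List.mem_pyRange_neg_one] at hs
        simp only [List.filter_append, List.filter_cons, List.filter_nil]
        have : ¬ (key x = s) := by omega
        simp [this]
      have hB : ∀ s ∈ PySem.List.pyRange (key x - 1) 0 (-1),
          (ys ++ [x]).filter (fun y => decide (key y = s)) = ys.filter (fun y => decide (key y = s)) := by
        intro s hs
        rw [PySem.List.mem_pyRange_neg_one] at hs
        simp only [List.filter_append, List.filter_cons, List.filter_nil]
        have : ¬ (key x = s) := by omega
        simp [this]
      rw [List.flatMap_congr hA, List.flatMap_congr hB]
      have hmid : (ys ++ [x]).filter (fun y => decide (key y = key x))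
          = ys.filter (fun y => decide (key y = key x)) ++ [x] := by
        simp [List.filter_append]
      rw [hmid]
      simp [List.append_assoc]
    · intro y hy
      rcases List.mem_append.mp hy with hy | hy
      · rcases List.mem_flatMap.mp hy with ⟨s, hs, hys'⟩
        rw [PySem.List.mem_pyRange_neg_one] at hs
        have := (List.mem_filter.mp hys').2
        simp only [decide_eq_true_eq] at this
        simp only [decide_eq_false_iff_not]
        omega
      · have := (List.mem_filter.mp hy).2
        simp only [decide_eq_true_eq] at this
        simp only [decide_eq_false_iff_not]
        omega
    · intro y hy
      rcases List.mem_flatMap.mp hy with ⟨s, hs, hys'⟩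
      rw [PySem.List.mem_pyRange_neg_one] at hs
      have := (List.mem_filter.mp hys').2
      simp only [decide_eq_true_eq] at this
      simp only [decide_eq_true_eq]
      omega

-- the grouping dict built by `buckets.setdefault(score, []).append(e)` holds, at each score,
-- exactly the elements with that score in encounter order
theorem getD_group {ν : Type} :
    ∀ (l : List (Int × ν)) (d : PySem.Dict Int (List ν)) (s : Int),
      (l.foldl (fun d p => d.insert p.1 (d.getD p.1 [] ++ [p.2])) d).getD s []
        = d.getD s [] ++ (l.filter (fun p => decide (p.1 = s))).map (fun p => p.2) := by
  intro l
  induction l with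
  | nil => simp
  | cons p t ih =>
    intro d s
    rw [List.foldl_cons, ih]
    rw [PySem.Dict.getD_insert]
    by_cases h : p.1 = s
    · subst h
      simp
    · have h' : ¬ (s = p.1) := fun hh => h hh.symm
      simp [h, h']


-- the common else-branch of the two ports, with the per-article match list `c`,
-- enriched dict `e` and reason string `r` abstracted
theorem body_eq {A V : Type} (raws : List A) (c : A → List String) (e : A → V) (r : A → String)
    (T : Nat) (hc : ∀ a, (c a).length ≤ T) :
    List.map (fun (item : Int × V × String) => item.2.1)
      (PySem.List.slice
        (PySem.List.sorted
          (raws.foldl (fun ranked a =>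
            if c a = [] then ranked
            else ranked ++ [(((c a).length : Int), e a, r a)]) [])
          (fun item => item.1) true)
        none (some 12))
    = PySem.List.slice
        ((PySem.List.pyRange (T : Int) 0 (-1)).foldl (fun out s =>
          out ++
            ((raws.foldl (fun scored a =>
                if c a = [] then scored
                else scored ++ [(((c a).length : Int), e a)]) []).foldl
              (fun buckets p => buckets.insert p.1 (buckets.getD p.1 [] ++ [p.2]))
              (PySem.Dict.mk [])).getD s []) [])
        none (some 12) := by
  have swapA : ∀ (acc : List (Int × V × String)) (a : A), a ∈ raws ->
      (if c a = [] then acc else acc ++ [(((c a).length : Int), e a, r a)])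
      = (if ¬ (c a = []) then acc ++ [(((c a).length : Int), e a, r a)] else acc) := by
    intro acc a _; by_cases h : c a = [] <;> simp [h]
  have swapB : ∀ (acc : List (Int × V)) (a : A), a ∈ raws ->
      (if c a = [] then acc else acc ++ [(((c a).length : Int), e a)])
      = (if ¬ (c a = []) then acc ++ [(((c a).length : Int), e a)] else acc) := by
    intro acc a _; by_cases h : c a = [] <;> simp [h]
  rw [PySem.List.foldl_congr_mem raws _ _ [] swapA,
    PySem.List.foldl_append_ite (fun a => ¬ (c a = [])) (fun a => (((c a).length : Int), e a, r a)) raws [],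
    PySem.List.foldl_congr_mem raws _ _ [] swapB,
    PySem.List.foldl_append_ite (fun a => ¬ (c a = [])) (fun a => (((c a).length : Int), e a)) raws [],
    PySem.List.foldl_append_eq_flatMap]
  simp only [getD_group, List.nil_append]
  have hb : ∀ x ∈ (List.filter (fun a => decide ¬ (c a = [])) raws).map
      (fun a => (((c a).length : Int), e a, r a)), 1 ≤ x.1 ∧ x.1 ≤ (T : Int) := by
    intro x hx
    rcases List.mem_map.mp hx with ⟨a, ha, rfl⟩
    have h1 : ¬ (c a = []) := by
      have := (List.mem_filter.mp ha).2
      simpa using this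
    have h2 : 0 < (c a).length := List.length_pos_iff.mpr h1
    have h3 := hc a
    constructor
    · show (1 : Int) ≤ ((c a).length : Int)
      exact_mod_cast h2
    · show ((c a).length : Int) ≤ (T : Int)
      exact_mod_cast h3
  rw [sorted_rev_eq_buckets _ _ _ hb,
    PySem.List.slice_to _ (by norm_num), PySem.List.slice_to _ (by norm_num),
    List.map_take, List.map_flatMap]
  refine congrArg (List.take (12 : Int).toNat) ?_
  refine List.flatMap_congr ?_
  intro s _
  have hed : (PySem.Dict.mk ([] : List (Int × List V))).getD s ([] : List V) = [] := rfl
  rw [hed, List.nil_append]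
  simp [List.filter_map, Function.comp]

-- ===== VERDICT (by name: the statement is the Claim_ definition above) =====
theorem fallback_filter_py_spec : Claim_equal_fallback_filter_py := by
  intro raw_articles interests _
  unfold Spec_fallback_filter_py fallback_filter_py fallback_filter_py_alt
  by_cases htok : tokenize_interests interests = []
  · simp [htok]
  · simp only [htok, if_false]
    exact body_eq raw_articles
      (fun article => (tokenize_interests interests).filter (fun token =>
        PySem.Str.isIn token (PySem.Str.lower (pyGetStr article "title") ++ " " ++
          PySem.Str.lower (pyGetStr article "summary"))))
      (fun article => ((PySem.Dict.ofList article).insert "match_reason"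
        ("This story is relevant to your interests around " ++
          PySem.Str.join ", " (PySem.List.slice ((tokenize_interests interests).filter (fun token =>
            PySem.Str.isIn token (PySem.Str.lower (pyGetStr article "title") ++ " " ++
              PySem.Str.lower (pyGetStr article "summary")))) none (some 3)) ++ ".")).items)
      (fun article => "This story is relevant to your interests around " ++
        PySem.Str.join ", " (PySem.List.slice ((tokenize_interests interests).filter (fun token =>
          PySem.Str.isIn token (PySem.Str.lower (pyGetStr article "title") ++ " " ++
            PySem.Str.lower (pyGetStr article "summary")))) none (some 3)) ++ ".")
      (tokenize_interests interests).length
      (fun article => List.length_filter_le _ _)
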